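-- pv_equiv track=rewrite | github.com/federicodanesin99/Batman | broadcom_csimond.py | split_log_into_CSI_records
-- ===== SOURCE A (Python) =====
-- def split_log_into_CSI_records(text):
--     samples = [""]
--     for line in text.splitlines():
--         if "CSI record:" in line:
--             samples.append("")
--         else:
--             samples[-1] += line
--     return samples
-- ===== SOURCE B (Python) =====
-- def split_log_into_CSI_records(text):
--     lines = text.splitlines()
--     bnds = [i for i, l in enumerate(lines) if "CSI record:" in l]
--     starts = [0] + [b + 1 for b in bnds]
--     ends = bnds + [len(lines)]
--     return ["".join(lines[s:e]) for s, e in zip(starts, ends)]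
-- ===== Notes on version B (the rewrite author's own statement) =====
-- stated objective: alternative
-- what changed: Replaces A's per-line accumulator that mutates the last list element with a two-pass decomposition: first collect the indices of marker lines, then build each record by joining the slice of lines between consecutive boundaries.
import Mathlib
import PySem

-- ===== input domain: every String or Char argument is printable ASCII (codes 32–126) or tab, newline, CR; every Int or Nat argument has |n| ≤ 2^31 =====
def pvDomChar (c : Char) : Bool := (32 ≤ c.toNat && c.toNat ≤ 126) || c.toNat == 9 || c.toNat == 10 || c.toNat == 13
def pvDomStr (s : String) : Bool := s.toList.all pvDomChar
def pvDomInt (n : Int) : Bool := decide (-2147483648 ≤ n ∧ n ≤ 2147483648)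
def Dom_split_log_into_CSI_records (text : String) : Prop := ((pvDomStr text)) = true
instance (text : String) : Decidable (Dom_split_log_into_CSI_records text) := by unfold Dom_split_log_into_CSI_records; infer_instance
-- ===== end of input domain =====

-- B replaces A's per-line accumulator (which grows the list and extends its last record in place)
-- with a two-pass decomposition: collect marker-line indices, then join the slice of lines between
-- consecutive boundaries; same O(n) cost, different shape ("alternative").

-- the membership test '"CSI record:" in line', shared by both ports
def pvMark (line : String) : Bool := PySem.Str.isIn "CSI record:" line

-- ===== PORT A =====
-- one loop step of A: append "" on a marker line, else samples[-1] += line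
-- (samples is always nonempty, so samples[-1] is its last element; getLastD "" is exact there)
def pvStepA (samples : List String) (line : String) : List String :=
  if pvMark line then samples ++ [""]
  else samples.dropLast ++ [samples.getLastD "" ++ line]

def split_log_into_CSI_records (text : String) : List String :=
  (PySem.Str.splitlines text).foldl pvStepA [""]

-- ===== PORT B =====
def split_log_into_CSI_records_alt (text : String) : List String :=
  let lines := PySem.Str.splitlines text
  let bnds := ((PySem.List.enumerate lines).filter (fun p => pvMark p.2)).map (fun p => p.1)
  let starts := 0 :: bnds.map (fun b => b + 1)
  let ends := bnds ++ [(lines.length : Int)]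
  (starts.zip ends).map (fun p => PySem.Str.join "" (PySem.List.slice lines (some p.1) (some p.2)))

-- ===== PRECONDITION & SPEC =====
def Spec_split_log_into_CSI_records (text : String) (out : List String) : Prop := out = split_log_into_CSI_records_alt text
instance (text : String) (out : List String) : Decidable (Spec_split_log_into_CSI_records text out) := by unfold Spec_split_log_into_CSI_records; infer_instance

-- ===== CLAIM (what is proved, stated in full; the proofs are below) =====
def Claim_equal_split_log_into_CSI_records : Prop := ∀ (text : String), Dom_split_log_into_CSI_records text → Spec_split_log_into_CSI_records text (split_log_into_CSI_records text)

-- ===== LEMMAS AND PROOFS =====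

-- the common recursive characterization of both ports on the line list
def pvRec : List String → List String
  | [] => [""]
  | l :: ls => if pvMark l then "" :: pvRec ls else (pvRec ls).modifyHead (l ++ ·)

lemma pvRec_ne_nil (ls : List String) : pvRec ls ≠ [] := by
  cases ls with
  | nil => simp [pvRec]
  | cons l ls =>
    simp only [pvRec]
    split
    · simp
    · cases h : pvRec ls with
      | nil => exact absurd h (pvRec_ne_nil ls)
      | cons a t => simp [List.modifyHead]

lemma pvRec_exists_cons (ls : List String) : ∃ a t, pvRec ls = a :: t := by
  cases hr : pvRec ls with
  | nil => exact absurd hr (pvRec_ne_nil ls)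
  | cons a t => exact ⟨a, t, rfl⟩

lemma join_empty_cons (x : String) (xs : List String) :
    PySem.Str.join "" (x :: xs) = x ++ PySem.Str.join "" xs := by
  cases xs with
  | nil => simp [PySem.Str.join, PySem.Chars.join, List.intercalate, String.ofList_toList]
  | cons y ys => simp [PySem.Str.join, PySem.Chars.join, List.intercalate,
      String.ofList_append, String.ofList_toList]

-- ---------- A's fold equals pvRec ----------

lemma foldl_stepA_append (ls : List String) (xs : List String) (c : String) :
    ls.foldl pvStepA (xs ++ [c]) = xs ++ ls.foldl pvStepA [c] := by
  induction ls generalizing xs c with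
  | nil => simp
  | cons l ls ih =>
    simp only [List.foldl_cons]
    by_cases h : pvMark l
    · have h1 : pvStepA (xs ++ [c]) l = (xs ++ [c]) ++ [""] := by simp [pvStepA, h]
      have h2 : pvStepA [c] l = [c] ++ [""] := by simp [pvStepA, h]
      rw [h1, h2, ih (xs ++ [c]) "", ih [c] "", List.append_assoc]
    · have h1 : pvStepA (xs ++ [c]) l = xs ++ [c ++ l] := by
        simp [pvStepA, h]
      have h2 : pvStepA [c] l = [c ++ l] := by simp [pvStepA, h]
      rw [h1, h2, ih xs (c ++ l)]

lemma foldl_stepA_eq_rec (ls : List String) (c : String) :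
    ls.foldl pvStepA [c] = (pvRec ls).modifyHead (c ++ ·) := by
  induction ls generalizing c with
  | nil => simp [pvRec, List.modifyHead, String.append_empty]
  | cons l ls ih =>
    simp only [List.foldl_cons, pvRec]
    obtain ⟨a, t, ht⟩ := pvRec_exists_cons ls
    by_cases h : pvMark l
    · have h2 : pvStepA [c] l = [c] ++ [""] := by simp [pvStepA, h]
      rw [h2, foldl_stepA_append ls [c] "", ih ""]
      simp [h, ht, List.modifyHead, String.empty_append, String.append_empty]
    · have h2 : pvStepA [c] l = [c ++ l] := by simp [pvStepA, h]
      rw [h2, ih (c ++ l)]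
      simp [h, ht, List.modifyHead, String.append_assoc]

lemma A_eq_rec (lines : List String) : lines.foldl pvStepA [""] = pvRec lines := by
  rw [foldl_stepA_eq_rec]
  obtain ⟨a, t, ht⟩ := pvRec_exists_cons lines
  simp [ht, List.modifyHead, String.empty_append]

-- ---------- B's index/slice construction equals pvRec ----------

def pvIdx (ls : List String) (s : Int) : List Int :=
  ((PySem.List.enumerate ls s).filter (fun p => pvMark p.2)).map (fun p => p.1)

def pvSeg (xs : List String) (p : Int × Int) : String :=
  PySem.Str.join "" (PySem.List.slice xs (some p.1) (some p.2))

def pvB (lines : List String) : List String :=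
  ((0 :: (pvIdx lines 0).map (fun b => b + 1)).zip (pvIdx lines 0 ++ [(lines.length : Int)])).map
    (pvSeg lines)

lemma alt_eq_pvB (text : String) :
    split_log_into_CSI_records_alt text = pvB (PySem.Str.splitlines text) := rfl

lemma idx_cons (l : String) (ls : List String) (s : Int) :
    pvIdx (l :: ls) s = (if pvMark l then [s] else []) ++ pvIdx ls (s + 1) := by
  by_cases h : pvMark l <;> simp [pvIdx, PySem.List.enumerate_cons, h]

lemma idx_shift (ls : List String) (s : Int) :
    pvIdx ls (s + 1) = (pvIdx ls s).map (fun b => b + 1) := by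
  induction ls generalizing s with
  | nil => simp [pvIdx, PySem.List.enumerate_nil]
  | cons l ls ih =>
    rw [idx_cons, idx_cons, ih (s + 1), List.map_append]
    by_cases h : pvMark l <;> simp [h]

lemma idx_le (ls : List String) (s : Int) : ∀ x ∈ pvIdx ls s, s ≤ x := by
  induction ls generalizing s with
  | nil => simp [pvIdx, PySem.List.enumerate_nil]
  | cons l ls ih =>
    intro x hx
    rw [idx_cons] at hx
    rcases List.mem_append.mp hx with h1 | h2
    · by_cases h : pvMark l
      · simp [h] at h1; omega
      · simp [h] at h1
    · have := ih (s + 1) x h2; omega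

lemma slice_cons_shift {α : Type} (l : α) (ls : List α) (a b : Int) (ha : 0 ≤ a) (hb : 0 ≤ b) :
    PySem.List.slice (l :: ls) (some (a + 1)) (some (b + 1)) =
      PySem.List.slice ls (some a) (some b) := by
  rw [PySem.List.slice_toNat _ (by omega) (by omega), PySem.List.slice_toNat _ ha hb,
    show (b + 1).toNat - (a + 1).toNat = b.toNat - a.toNat from by omega,
    show (a + 1).toNat = a.toNat + 1 from by omega, List.drop_succ_cons]

lemma seg_shift (l : String) (ls : List String) (p : Int × Int) (h1 : 0 ≤ p.1) (h2 : 0 ≤ p.2) :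
    pvSeg (l :: ls) (p.1 + 1, p.2 + 1) = pvSeg ls p := by
  simp only [pvSeg, slice_cons_shift l ls p.1 p.2 h1 h2]

lemma map_shift_zip (l : String) (ls : List String) (xs ys : List Int)
    (hx : ∀ x ∈ xs, 0 ≤ x) (hy : ∀ y ∈ ys, 0 ≤ y) :
    ((xs.map (fun b => b + 1)).zip (ys.map (fun b => b + 1))).map (pvSeg (l :: ls)) =
      (xs.zip ys).map (pvSeg ls) := by
  rw [List.zip_map, List.map_map]
  apply List.map_congr_left
  intro p hp
  obtain ⟨hp1, hp2⟩ := List.of_mem_zip hp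
  simpa [Prod.map] using seg_shift l ls p (hx p.1 hp1) (hy p.2 hp2)

lemma seg_zero_zero (xs : List String) : pvSeg xs (0, 0) = "" := by
  have h : PySem.List.slice xs (some (0 : Int)) (some (0 : Int)) = [] := by
    rw [PySem.List.slice_toNat _ le_rfl le_rfl]; simp
  rw [pvSeg, h]; rfl

lemma seg_head (l : String) (ls : List String) (e : Int) (he : 0 ≤ e) :
    pvSeg (l :: ls) (0, e + 1) = l ++ pvSeg ls (0, e) := by
  have h1 : PySem.List.slice (l :: ls) (some (0 : Int)) (some (e + 1)) =
      l :: PySem.List.slice ls (some (0 : Int)) (some e) := by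
    rw [PySem.List.slice_toNat _ le_rfl (by omega), PySem.List.slice_toNat _ le_rfl he]
    have : (e + 1).toNat = e.toNat + 1 := by omega
    simp [this]
  simp only [pvSeg, h1, join_empty_cons]

lemma pvB_eq_rec (lines : List String) : pvB lines = pvRec lines := by
  induction lines with
  | nil => rfl
  | cons l ls ih =>
    have hlen : (((l :: ls).length : Nat) : Int) = (ls.length : Int) + 1 := by
      push_cast [List.length_cons]; ring
    have hx0 : ∀ x ∈ (0 : Int) :: (pvIdx ls 0).map (fun b => b + 1), 0 ≤ x := by
      intro x hx
      rcases List.mem_cons.mp hx with h1 | h1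
      · omega
      · obtain ⟨b, hb, rfl⟩ := List.mem_map.mp h1
        have := idx_le ls 0 b hb; omega
    have hy0 : ∀ y ∈ pvIdx ls 0 ++ [(ls.length : Int)], 0 ≤ y := by
      intro y hy
      rcases List.mem_append.mp hy with h1 | h1
      · have := idx_le ls 0 y h1; omega
      · simp at h1; omega
    by_cases h : pvMark l
    · -- marker line: first record is "" and everything shifts by one
      have hidx : pvIdx (l :: ls) 0 = 0 :: (pvIdx ls 0).map (fun b => b + 1) := by
        rw [idx_cons, idx_shift]; simp [h]
      have key : pvB (l :: ls) = "" :: pvB ls := by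
        unfold pvB
        rw [hidx, hlen,
          show ((0 : Int) :: (pvIdx ls 0).map (fun b => b + 1)) ++ [(ls.length : Int) + 1] =
            (0 : Int) :: (pvIdx ls 0 ++ [(ls.length : Int)]).map (fun b => b + 1) from by simp,
          List.zip_cons_cons, List.map_cons, seg_zero_zero,
          map_shift_zip l ls _ _ hx0 hy0]
      rw [key, ih]
      simp [pvRec, h]
    · -- ordinary line: it is prepended to the first record
      have hidx : pvIdx (l :: ls) 0 = (pvIdx ls 0).map (fun b => b + 1) := by
        rw [idx_cons, idx_shift]; simp [h]
      obtain ⟨e0, erest, hE⟩ : ∃ e t, pvIdx ls 0 ++ [(ls.length : Int)] = e :: t := by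
        cases pvIdx ls 0 with
        | nil => exact ⟨_, _, rfl⟩
        | cons a t => exact ⟨_, _, rfl⟩
      have he0 : 0 ≤ e0 := hy0 e0 (by rw [hE]; simp)
      have herest : ∀ x ∈ erest, 0 ≤ x := fun x hx => hy0 x (by rw [hE]; simp [hx])
      have hxm : ∀ x ∈ (pvIdx ls 0).map (fun b => b + 1), 0 ≤ x := by
        intro x hx
        obtain ⟨b, hb, rfl⟩ := List.mem_map.mp hx
        have := idx_le ls 0 b hb; omega
      have key : pvB (l :: ls) = (pvB ls).modifyHead (l ++ ·) := by
        unfold pvB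
        rw [hidx, hlen,
          show (pvIdx ls 0).map (fun b => b + 1) ++ [(ls.length : Int) + 1] =
            (pvIdx ls 0 ++ [(ls.length : Int)]).map (fun b => b + 1) from by simp,
          hE, List.map_cons, List.zip_cons_cons, List.map_cons,
          map_shift_zip l ls _ _ hxm herest, seg_head l ls e0 he0,
          List.zip_cons_cons, List.map_cons, List.modifyHead]
      rw [key, ih]
      simp [pvRec, h]

-- ===== VERDICT (by name: the statement is the Claim_ definition above) =====
theorem split_log_into_CSI_records_spec : Claim_equal_split_log_into_CSI_records := by
  intro text _
  show split_log_into_CSI_records text = split_log_into_CSI_records_alt text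
  rw [split_log_into_CSI_records, A_eq_rec, alt_eq_pvB, pvB_eq_rec]
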